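-- pv_equiv track=rewrite | github.com/MrBrantCode/unitest_baseline | mut_generate/mist_train_taco/taco_15145/solution.py | is_largest_prime_factor_power_greater_than_one
-- ===== SOURCE A (Python) =====
-- def is_largest_prime_factor_power_greater_than_one(n: int) -> int:
--     i = 2
--     prime_factors = {}
--
--     # Factorize n
--     while i * i <= n:
--         while n % i == 0:
--             if i in prime_factors:
--                 prime_factors[i] += 1
--             else:
--                 prime_factors[i] = 1
--             n = n // i
--         i += 1
--
--     # If n is still greater than 1, it is a prime factor
--     if n > 1:
--         prime_factors[n] = 1
--
--     # If no prime factors found, return 0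
--     if not prime_factors:
--         return 0
--
--     # Find the largest prime factor and check its power
--     largest_prime_factor = max(prime_factors)
--     if prime_factors[largest_prime_factor] > 1:
--         return 1
--     else:
--         return 0
-- ===== SOURCE B (Python) =====
-- def _lpf(m: int):
--     # (largest prime factor of m, its exponent), computed recursively; (1, 0) for m <= 1
--     if m <= 1:
--         return (1, 0)
--     d = 2
--     while d * d <= m and m % d != 0:
--         d += 1
--     p = d if d * d <= m else m  # smallest prime factor of m
--     q, e = _lpf(m // p)
--     if p > q:
--         return (p, 1)
--     if p == q:
--         return (q, e + 1)
--     return (q, e)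
--
--
-- def is_largest_prime_factor_power_greater_than_one(n: int) -> int:
--     if n <= 1:
--         return 0
--     _, e = _lpf(n)
--     return 1 if e > 1 else 0
-- ===== Notes on version B (the rewrite author's own statement) =====
-- stated objective: alternative
-- what changed: B replaces A's iterative factorization (nested while loops accumulating an exponent dictionary, then max() over keys) by a recursion: each level finds the smallest prime factor with a fresh scan, divides once, recurses, and combines the child's (largest prime, exponent) pair, so no dictionary, no exponent table and no max() scan exist.
import Mathlib
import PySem

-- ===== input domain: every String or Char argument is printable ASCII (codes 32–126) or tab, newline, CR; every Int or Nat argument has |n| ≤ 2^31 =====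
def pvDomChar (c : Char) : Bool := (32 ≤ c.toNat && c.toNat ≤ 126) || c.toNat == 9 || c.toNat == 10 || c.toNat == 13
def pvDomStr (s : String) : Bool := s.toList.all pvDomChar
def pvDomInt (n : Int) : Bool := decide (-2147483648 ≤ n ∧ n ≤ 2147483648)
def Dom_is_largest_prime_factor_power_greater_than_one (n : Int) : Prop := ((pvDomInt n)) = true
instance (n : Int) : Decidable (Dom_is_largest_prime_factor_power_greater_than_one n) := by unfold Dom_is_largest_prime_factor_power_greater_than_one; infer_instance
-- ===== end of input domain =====

-- B replaces A's iterative dict-of-exponents factorization (and max() scan) by a recursion that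
-- finds the smallest prime factor afresh at each level and combines (largest prime, exponent)
-- pairs on the way back up (objective: alternative, same asymptotic cost).

-- termination measures for the ports' loops (cited by name in decreasing_by)
theorem pvDivDec (i n : Int) (h2 : 2 ≤ i) (hn : 0 < n) :
    (PySem.Int.floordiv n i).toNat < n.toNat := by
  have hi : (0:Int) < i := zero_lt_two.trans_le h2
  rw [PySem.Int.floordiv_eq_ediv_of_pos hi]
  exact (Int.toNat_lt_toNat hn).mpr
    (Int.ediv_lt_of_lt_mul hi (lt_mul_right hn (one_lt_two.trans_le h2)))

theorem pvDivLe (i n : Int) (h2 : 2 ≤ i) (hn : 0 < n) : PySem.Int.floordiv n i ≤ n := by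
  rw [PySem.Int.floordiv_eq_ediv_of_pos (zero_lt_two.trans_le h2)]
  exact Int.ediv_le_self _ hn.le

theorem pvLoopDec (i n m : Int) (hle : i * i ≤ n) (hm : m ≤ n) :
    (m + 1 - (i + 1)).toNat < (n + 1 - i).toNat := by
  have hii : i ≤ i * i := by
    have h := Int.le_self_sq i
    rwa [sq] at h
  have hin : i ≤ n := hii.trans hle
  have hpos : 0 < n + 1 - i := sub_pos.mpr (Int.lt_add_one_iff.mpr hin)
  have hlt : m + 1 - (i + 1) < n + 1 - i := by
    have h1 : m + 1 - (i + 1) = m - i := by ring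
    have h2 : m - i < n + 1 - i := sub_lt_sub_right (Int.lt_add_one_iff.mpr hm) i
    rw [h1]; exact h2
  exact (Int.toNat_lt_toNat hpos).mpr hlt

-- ===== PORT A =====
-- inner `while n % i == 0:` loop of A; the extra guards `2 ≤ i ∧ 0 < n` only make the
-- recursion terminate on states the Python loop never reaches (it is entered with n ≥ i*i ≥ 4),
-- and the subtype records `result ≤ n`, which the outer loop's termination measure needs
def pvADiv (i n : Int) (d : PySem.Dict Int Int) : {p : Int × PySem.Dict Int Int // p.1 ≤ n} :=
  if h : 2 ≤ i ∧ 0 < n ∧ PySem.Int.mod n i = 0 then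
    let r := pvADiv i (PySem.Int.floordiv n i)
      (if d.contains i then d.insert i (d.getD i 0 + 1) else d.insert i 1)
    ⟨r.val, r.property.trans (pvDivLe i n h.1 h.2.1)⟩
  else ⟨(n, d), le_refl n⟩
termination_by n.toNat
decreasing_by exact pvDivDec i n h.1 h.2.1

-- outer `while i * i <= n:` loop of A
def pvALoop (i n : Int) (d : PySem.Dict Int Int) : Int × PySem.Dict Int Int :=
  if i * i ≤ n then
    pvALoop (i + 1) (pvADiv i n d).val.1 (pvADiv i n d).val.2
  else (n, d)
termination_by (n + 1 - i).toNat
decreasing_by exact pvLoopDec i n _ ‹i * i ≤ n› (pvADiv i n d).property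

-- everything after the loops in A (the dict post-processing; `largest` only read when the dict is nonempty)
def pvATail (nf : Int) (d0 : PySem.Dict Int Int) : Int :=
  let d := if nf > 1 then d0.insert nf 1 else d0
  if d.size = 0 then 0
  else
    match PySem.List.max? d.keys (fun k => k) with
    | some largest => if d.getD largest 0 > 1 then 1 else 0
    | none => 0

def is_largest_prime_factor_power_greater_than_one (n : Int) : Int :=
  match pvALoop 2 n PySem.Dict.empty with
  | (nf, d) => pvATail nf d

-- ===== PORT B =====
-- `while d * d <= m and m % d != 0: d += 1` — the fresh smallest-factor scan of _lpf
def pvScan (d m : Int) : Int :=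
  if h : d * d ≤ m ∧ ¬ PySem.Int.mod m d = 0 then pvScan (d + 1) m else d
termination_by (m + 1 - d).toNat
decreasing_by exact pvLoopDec d m m h.1 (le_refl m)

theorem pvScan_ge (d m : Int) : d ≤ pvScan d m := by
  fun_induction pvScan d m with
  | case1 d h ih => omega
  | case2 d h => omega

-- `p = d if d * d <= m else m` of _lpf
def pvP (m : Int) : Int :=
  if pvScan 2 m * pvScan 2 m ≤ m then pvScan 2 m else m

theorem pvP_ge2 (m : Int) (hm : 2 ≤ m) : 2 ≤ pvP m := by
  unfold pvP; split
  · exact pvScan_ge 2 m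
  · exact hm

-- the final branch combination of _lpf
def pvGoStep (p : Int) (r : Int × Int) : Int × Int :=
  if p > r.1 then (p, 1) else if p = r.1 then (r.1, r.2 + 1) else r

-- recursive _lpf itself
def pvGo (m : Int) : Int × Int :=
  if hm : m ≤ 1 then (1, 0)
  else pvGoStep (pvP m) (pvGo (PySem.Int.floordiv m (pvP m)))
termination_by m.toNat
decreasing_by exact pvDivDec (pvP m) m (pvP_ge2 m (by omega)) (by omega)

def is_largest_prime_factor_power_greater_than_one_alt (n : Int) : Int :=
  if n ≤ 1 then 0
  else if (pvGo n).2 > 1 then 1 else 0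

-- ===== PRECONDITION & SPEC =====
def Spec_is_largest_prime_factor_power_greater_than_one (n : Int) (out : Int) : Prop := out = is_largest_prime_factor_power_greater_than_one_alt n
instance (n : Int) (out : Int) : Decidable (Spec_is_largest_prime_factor_power_greater_than_one n out) := by unfold Spec_is_largest_prime_factor_power_greater_than_one; infer_instance

-- ===== CLAIM (what is proved, stated in full; the proofs are below) =====
def Claim_equal_is_largest_prime_factor_power_greater_than_one : Prop := ∀ (n : Int), Dom_is_largest_prime_factor_power_greater_than_one n → Spec_is_largest_prime_factor_power_greater_than_one n (is_largest_prime_factor_power_greater_than_one n)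

-- ===== LEMMAS AND PROOFS =====

-- p is the largest prime factor of n (primes taken positive)
def pvIsLargest (n p : Int) : Prop :=
  2 ≤ p ∧ Prime p ∧ p ∣ n ∧ ∀ q : Int, 2 ≤ q → Prime q → q ∣ n → q ≤ p

theorem pvIsLargest_unique {n p q : Int} (hp : pvIsLargest n p) (hq : pvIsLargest n q) : p = q :=
  le_antisymm (hq.2.2.2 p hp.1 hp.2.1 hp.2.2.1) (hp.2.2.2 q hq.1 hq.2.1 hq.2.2.1)

-- a number below j*j with no divisor in [2, j) is prime
theorem pvPrime_of_no_divisor_lt (v j : Int) (h2 : 2 ≤ v) (hj : 2 ≤ j) (hvj : v < j * j)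
    (h : ∀ m : Int, 2 ≤ m → m < j → ¬ m ∣ v) : Prime v := by
  have hcast : (v.toNat : Int) = v := Int.toNat_of_nonneg (by omega)
  have hv2 : 2 ≤ v.toNat := by omega
  have hap : Nat.Prime v.toNat.minFac := Nat.minFac_prime (by omega)
  have hadvd : (v.toNat.minFac : Int) ∣ v := by
    have h1 : (v.toNat.minFac : Int) ∣ (v.toNat : Int) := Int.natCast_dvd_natCast.mpr (Nat.minFac_dvd _)
    rwa [hcast] at h1
  have ha2 : 2 ≤ (v.toNat.minFac : Int) := by exact_mod_cast hap.two_le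
  have haj : j ≤ (v.toNat.minFac : Int) := by
    by_contra hlt
    exact h _ ha2 (by omega) hadvd
  by_cases hav : v.toNat.minFac = v.toNat
  · have hp : Prime ((v.toNat : Nat) : Int) := Nat.prime_iff_prime_int.mp (hav ▸ hap)
    rwa [hcast] at hp
  · exfalso
    obtain ⟨b, hb⟩ := Nat.minFac_dvd v.toNat
    have hb0 : b ≠ 0 := by rintro rfl; omega
    have hb1 : b ≠ 1 := by rintro rfl; omega
    have hba : v.toNat.minFac ≤ b := Nat.minFac_le_of_dvd (by omega) ⟨v.toNat.minFac, by rw [Nat.mul_comm]; exact hb⟩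
    have hbi : (v.toNat.minFac : Int) ≤ (b : Int) := by exact_mod_cast hba
    have hvi : v = (v.toNat.minFac : Int) * (b : Int) := by
      rw [← hcast]; exact_mod_cast hb
    nlinarith

-- strictly increasing list: every element is at most the last
theorem pvLe_getLast (l : List Int) (h : l.Pairwise (· < ·)) (x : Int) (hx : x ∈ l)
    (hne : l ≠ []) : x ≤ l.getLast hne := by
  induction l with
  | nil => simp at hx
  | cons a t ih =>
    rcases List.mem_cons.mp hx with rfl | hm
    · cases t with
      | nil => simp [List.getLast]
      | cons b s =>
        have hlt : x < (b::s).getLast (by simp) := (List.pairwise_cons.mp h).1 _ (List.getLast_mem _)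
        rw [List.getLast_cons (by simp)]; exact hlt.le
    · have hne' : t ≠ [] := by rintro rfl; simp at hm
      rw [List.getLast_cons hne']
      exact ih (List.pairwise_cons.mp h).2 hm hne'

-- Python's max of a strictly increasing nonempty list is its last element
theorem pvMax_eq_getLast (l : List Int) (h : l.Pairwise (· < ·)) (hne : l ≠ []) :
    PySem.List.max? l (fun k => k) = some (l.getLast hne) := by
  cases hm : PySem.List.max? l (fun k => k) with
  | none => exact absurd ((PySem.List.max?_eq_none_iff l _).mp hm) hne
  | some m =>
    have h1 : m ≤ l.getLast hne := pvLe_getLast l h m (PySem.List.max?_mem hm) hne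
    have h2 : l.getLast hne ≤ m := PySem.List.max?_isMax hm _ (List.getLast_mem hne)
    rw [le_antisymm h1 h2]

-- ----- B-side lemmas -----

-- the scan returns the smallest divisor candidate: nothing below it divides m,
-- and it divides m whenever its square is still at most m
theorem pvScan_spec (d m : Int) :
    (∀ q : Int, 2 ≤ q → q < d → ¬ q ∣ m) →
    ((∀ q : Int, 2 ≤ q → q < pvScan d m → ¬ q ∣ m) ∧
     (pvScan d m * pvScan d m ≤ m → pvScan d m ∣ m)) := by
  fun_induction pvScan d m with
  | case1 d h ih =>
    intro hinv
    apply ih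
    intro q hq1 hq2 hdvd
    by_cases hqd : q = d
    · exact h.2 ((PySem.Int.mod_eq_zero_iff_dvd m d).mpr (hqd ▸ hdvd))
    · exact hinv q hq1 (by omega) hdvd
  | case2 d h =>
    intro hinv
    refine ⟨hinv, ?_⟩
    intro hle
    rcases not_and_or.mp h with h1 | h2
    · exact absurd hle h1
    · exact (PySem.Int.mod_eq_zero_iff_dvd m d).mp (not_not.mp h2)

-- pvP m is the smallest prime factor of m (m ≥ 2)
theorem pvSpf (m : Int) (hm : 2 ≤ m) :
    2 ≤ pvP m ∧ pvP m ∣ m ∧ Prime (pvP m) ∧ ∀ q : Int, 2 ≤ q → q ∣ m → pvP m ≤ q := by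
  obtain ⟨hnod, hdvd⟩ := pvScan_spec 2 m (fun q hq1 hq2 _ => absurd hq2 (by omega))
  have hd2 : 2 ≤ pvScan 2 m := pvScan_ge 2 m
  unfold pvP
  by_cases hc : pvScan 2 m * pvScan 2 m ≤ m
  · rw [if_pos hc]
    have hdm : pvScan 2 m ∣ m := hdvd hc
    refine ⟨hd2, hdm, ?_, ?_⟩
    · exact pvPrime_of_no_divisor_lt (pvScan 2 m) (pvScan 2 m) hd2 hd2 (by nlinarith)
        (fun a h1 h2 hdvd' => hnod a h1 h2 (hdvd'.trans hdm))
    · intro q hq1 hq2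
      by_contra hlt
      exact hnod q hq1 (by omega) hq2
  · rw [if_neg hc]
    push_neg at hc
    refine ⟨hm, dvd_refl m, pvPrime_of_no_divisor_lt m (pvScan 2 m) hm hd2 hc hnod, ?_⟩
    intro q hq1 hq2
    by_contra hlt
    push_neg at hlt
    have hqd : pvScan 2 m ≤ q := by
      by_contra hqd
      exact hnod q hq1 (by omega) hq2
    obtain ⟨c, hcq⟩ := hq2
    have hc0 : 0 < c := by nlinarith
    have hc2 : 2 ≤ c := by nlinarith
    have hcd : c < pvScan 2 m := by nlinarith
    exact hnod c hc2 hcd ⟨q, by rw [hcq]; ring⟩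

-- the recursion computes the largest prime factor together with (exactly) its exponent;
-- the exponent exceeds one iff the square of the largest prime factor divides m
theorem pvGo_spec_aux (k : Nat) : ∀ m : Int, m.toNat ≤ k → 2 ≤ m →
    pvIsLargest m (pvGo m).1 ∧ 1 ≤ (pvGo m).2 ∧
      ((pvGo m).2 > 1 ↔ (pvGo m).1 * (pvGo m).1 ∣ m) := by
  induction k with
  | zero => intro m h0 h2; omega
  | succ k ih =>
    intro m hk hm2
    have hgo : pvGo m = pvGoStep (pvP m) (pvGo (PySem.Int.floordiv m (pvP m))) := by
      rw [pvGo, dif_neg (by omega : ¬ m ≤ 1)]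
    obtain ⟨hp2, hpdvd, hpp, hpmin⟩ := pvSpf m hm2
    have hfd : PySem.Int.floordiv m (pvP m) = m / pvP m :=
      PySem.Int.floordiv_eq_ediv_of_pos (by omega)
    have hmp : m / pvP m * pvP m = m := Int.ediv_mul_cancel hpdvd
    set p := pvP m with hpdef
    set m' := m / p with hm'def
    rw [hfd] at hgo
    have hm'pos : 0 < m' := by nlinarith
    by_cases hm'2 : 2 ≤ m'
    · have hm'lt : m' < m := by nlinarith
      have hm'k : m'.toNat ≤ k := by omega
      obtain ⟨⟨hq2, hqp, hqdvd, hqmax⟩, he1, hiff⟩ := ih m' hm'k hm'2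
      have hm'm : m' ∣ m := ⟨p, hmp.symm⟩
      have hpq : p ≤ (pvGo m').1 := hpmin (pvGo m').1 hq2 (hqdvd.trans hm'm)
      by_cases hpeq : p = (pvGo m').1
      · have hstep : pvGoStep p (pvGo m') = ((pvGo m').1, (pvGo m').2 + 1) := by
          unfold pvGoStep
          rw [if_neg (by omega), if_pos hpeq]
        rw [hgo, hstep]
        refine ⟨⟨hq2, hqp, hqdvd.trans hm'm, ?_⟩, by omega, ?_⟩
        · intro r hr2 hrp hrdvd
          have hr' : r ∣ m' * p := by rwa [← hmp] at hrdvd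
          rcases (Prime.dvd_mul hrp).mp hr' with h | h
          · exact hqmax r hr2 hrp h
          · exact (Int.le_of_dvd (by omega) h).trans hpq
        · obtain ⟨c, hc⟩ := hqdvd
          constructor
          · intro _
            exact ⟨c, by rw [← hpeq, ← hmp, show m' = p * c from by rw [hpeq]; exact hc]; ring⟩
          · intro _; omega
      · have hplt : p < (pvGo m').1 := lt_of_le_of_ne hpq hpeq
        have hstep : pvGoStep p (pvGo m') = pvGo m' := by
          unfold pvGoStep
          rw [if_neg (by omega), if_neg hpeq]
        rw [hgo, hstep]
        have hnqp : ¬ (pvGo m').1 ∣ p := fun hd => by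
          have := Int.le_of_dvd (by omega) hd; omega
        refine ⟨⟨hq2, hqp, hqdvd.trans hm'm, ?_⟩, he1, ?_⟩
        · intro r hr2 hrp hrdvd
          have hr' : r ∣ m' * p := by rwa [← hmp] at hrdvd
          rcases (Prime.dvd_mul hrp).mp hr' with h | h
          · exact hqmax r hr2 hrp h
          · exact (Int.le_of_dvd (by omega) h).trans hpq
        · rw [hiff]
          constructor
          · intro hd; exact hd.trans hm'm
          · intro hd
            have hd2 : (pvGo m').1 ^ 2 ∣ m' * p := by
              rw [← hmp] at hd; rwa [pow_two]
            have := hqp.pow_dvd_of_dvd_mul_right 2 hnqp hd2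
            rwa [pow_two] at this
    · have hm'1 : m' = 1 := by omega
      have hmeq : m = p := by rw [← hmp, hm'1, one_mul]
      have hg1 : pvGo m' = (1, 0) := by rw [hm'1, pvGo]; norm_num
      have hstep : pvGoStep p (pvGo m') = (p, 1) := by
        rw [hg1]; unfold pvGoStep
        rw [if_pos (by simp only []; omega)]
      rw [hgo, hstep]
      refine ⟨⟨hp2, hpp, hpdvd, ?_⟩, le_refl 1, ?_⟩
      · intro r hr2 _ hrdvd
        have := Int.le_of_dvd (by omega) hrdvd
        omega
      · constructor
        · intro h; omega
        · intro hd
          exfalso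
          rw [hmeq] at hd
          have := Int.le_of_dvd (by omega) hd
          nlinarith

theorem pvGo_spec (m : Int) (hm : 2 ≤ m) :
    pvIsLargest m (pvGo m).1 ∧ 1 ≤ (pvGo m).2 ∧
      ((pvGo m).2 > 1 ↔ (pvGo m).1 * (pvGo m).1 ∣ m) :=
  pvGo_spec_aux m.toNat m (le_refl _) hm

-- ----- A-side lemmas -----

-- loop invariant of A: i ≥ 2, current value n positive, the original n0 is the dict's prime
-- powers times n, the dict's keys are increasing primes below i with positive exponents,
-- and n has no divisor in [2, i)
def pvInv (n0 i n : Int) (d : PySem.Dict Int Int) : Prop :=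
  2 ≤ i ∧ 0 < n ∧
  n0 = (d.items.map (fun p => p.1 ^ p.2.toNat)).prod * n ∧
  (d.items.map Prod.fst).Pairwise (· < ·) ∧
  (∀ p ∈ d.items, 2 ≤ p.1 ∧ p.1 < i ∧ Prime p.1 ∧ (1:Int) ≤ p.2) ∧
  (∀ m : Int, 2 ≤ m → m < i → ¬ m ∣ n)

-- the inner loop of A: either i does not divide n and nothing happens, or n = i^t * m with
-- i ∤ m and A records t more copies of i
theorem pvADiv_spec (i : Int) (h2 : 2 ≤ i) (n : Int) (hn : 0 < n) (d : PySem.Dict Int Int) :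
    (¬ i ∣ n ∧ (pvADiv i n d).val = (n, d)) ∨
    (∃ (t : Nat) (m : Int), 1 ≤ t ∧ 0 < m ∧ n = i ^ t * m ∧ ¬ i ∣ m ∧
      (pvADiv i n d).val = (m, d.insert i (d.getD i 0 + (t : Int)))) := by
  by_cases hdvd : i ∣ n
  · have hmod : PySem.Int.mod n i = 0 := (PySem.Int.mod_eq_zero_iff_dvd n i).mpr hdvd
    have hcond : 2 ≤ i ∧ 0 < n ∧ PySem.Int.mod n i = 0 := ⟨h2, hn, hmod⟩
    have hfd : PySem.Int.floordiv n i = n / i := PySem.Int.floordiv_eq_ediv_of_pos (by omega)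
    have hqn : n / i * i = n := Int.ediv_mul_cancel hdvd
    have hq : 0 < n / i := by nlinarith [hqn]
    have hupd : (if d.contains i then d.insert i (d.getD i 0 + 1) else d.insert i 1) =
        d.insert i (d.getD i 0 + 1) := by
      by_cases hc : d.contains i
      · simp [hc]
      · have : d.contains i = false := by simpa using hc
        simp [this, PySem.Dict.getD_of_not_contains d 0 this]
    have hAu : (pvADiv i n d).val = (pvADiv i (n / i) (d.insert i (d.getD i 0 + 1))).val := by
      rw [pvADiv, dif_pos hcond]
      show (pvADiv i (PySem.Int.floordiv n i)
        (if d.contains i then d.insert i (d.getD i 0 + 1) else d.insert i 1)).val = _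
      rw [hfd, hupd]
    rcases pvADiv_spec i h2 (n / i) hq (d.insert i (d.getD i 0 + 1)) with
      ⟨hnd, hA⟩ | ⟨t, m, ht, hm, heq, hnd, hA⟩
    · right
      refine ⟨1, n / i, le_refl 1, hq, by rw [pow_one, mul_comm]; exact hqn.symm, hnd, ?_⟩
      rw [hAu, hA]; norm_num
    · right
      refine ⟨t + 1, m, by omega, hm, ?_, hnd, ?_⟩
      · rw [pow_succ]
        calc n = n / i * i := hqn.symm
        _ = (i ^ t * m) * i := by rw [heq]
        _ = i ^ t * i * m := by ring
      · rw [hAu, hA, PySem.Dict.getD_insert_self, PySem.Dict.insert_insert_self]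
        congr 2
        push_cast; ring
  · left
    have hmod : ¬ PySem.Int.mod n i = 0 := fun hc => hdvd ((PySem.Int.mod_eq_zero_iff_dvd n i).mp hc)
    refine ⟨hdvd, ?_⟩
    show (pvADiv i n d).val = (n, d)
    rw [pvADiv, dif_neg (fun hc => hmod hc.2.2)]
termination_by n.toNat
decreasing_by
  have h1 : n / i < n := by
    apply Int.ediv_lt_of_lt_mul (by omega)
    nlinarith
  have h2 : 0 ≤ n / i := Int.ediv_nonneg (by omega) (by omega)
  omega

-- one outer step of A preserves the invariant
theorem pvStep (n0 i n : Int) (d : PySem.Dict Int Int)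
    (h : pvInv n0 i n d) (hle : i * i ≤ n) :
    pvInv n0 (i+1) (pvADiv i n d).val.1 (pvADiv i n d).val.2 := by
  obtain ⟨hi2, hn, hprod, hpair, hkeys, hsmall⟩ := h
  rcases pvADiv_spec i hi2 n hn d with ⟨hnd, hA⟩ | ⟨t, m, ht, hm, heq, hnd, hA⟩
  · rw [hA]
    refine ⟨by omega, hn, hprod, hpair, ?_, ?_⟩
    · intro p hp; obtain ⟨a, b, c, e⟩ := hkeys p hp; exact ⟨a, by omega, c, e⟩
    · intro mm hm1 hm2 hdvd
      by_cases hmi : mm = i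
      · exact hnd (hmi ▸ hdvd)
      · exact hsmall mm hm1 (by omega) hdvd
  · have hni : d.contains i = false := by
      by_contra hc
      have hc' : d.contains i = true := by simpa using hc
      obtain ⟨p, hp, hpe⟩ := List.mem_map.mp ((PySem.Dict.contains_iff_mem_keys d i).mp hc')
      have := (hkeys p hp).2.1; omega
    rw [hA]
    have hgd : d.getD i 0 = 0 := PySem.Dict.getD_of_not_contains d 0 hni
    have hitems : (d.insert i (d.getD i 0 + (t : Int))).items = d.items ++ [(i, (t : Int))] := by
      rw [hgd, zero_add]; exact PySem.Dict.items_insert_of_not_contains d _ hni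
    have hmdn : m ∣ n := ⟨i ^ t, by rw [heq]; ring⟩
    have hidvd : i ∣ n := heq ▸ dvd_mul_of_dvd_left (dvd_pow_self i (by omega)) m
    have hip : Prime i := by
      apply pvPrime_of_no_divisor_lt i i hi2 hi2 (by nlinarith)
      intro mm hm1 hm2 hdvd; exact hsmall mm hm1 hm2 (hdvd.trans hidvd)
    refine ⟨by omega, hm, ?_, ?_, ?_, ?_⟩
    · rw [hitems, List.map_append, List.prod_append, hprod, heq]
      simp [Int.toNat_natCast]
      ring
    · rw [hitems, List.map_append]
      apply List.pairwise_append.mpr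
      refine ⟨hpair, by simp, ?_⟩
      intro a ha b hb
      simp only [List.map_cons, List.map_nil, List.mem_singleton] at hb
      subst hb
      obtain ⟨p, hp, rfl⟩ := List.mem_map.mp ha
      exact (hkeys p hp).2.1
    · intro p hp
      rw [hitems] at hp
      rcases List.mem_append.mp hp with hp | hp
      · obtain ⟨a, b, c, e⟩ := hkeys p hp; exact ⟨a, by omega, c, e⟩
      · simp only [List.mem_singleton] at hp
        subst hp
        exact ⟨hi2, by omega, hip, by show (1:Int) ≤ (t:Int); exact_mod_cast ht⟩
    · intro mm hm1 hm2 hdvd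
      by_cases hmi : mm = i
      · exact hnd (hmi ▸ hdvd)
      · exact hsmall mm hm1 (by omega) (hdvd.trans hmdn)

-- running A's outer loop from an invariant state lands in a stopped invariant state
theorem pvALoop_spec (n0 i n : Int) (d : PySem.Dict Int Int) :
    pvInv n0 i n d →
    ∃ j, ¬ (j * j ≤ (pvALoop i n d).1) ∧ pvInv n0 j (pvALoop i n d).1 (pvALoop i n d).2 := by
  fun_induction pvALoop i n d with
  | case1 i n d hle ih =>
    intro hInv
    exact ih (pvStep n0 i n d hInv hle)
  | case2 i n d hle =>
    intro hInv
    exact ⟨i, hle, hInv⟩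

-- from a stopped invariant state: A's post-processing answers 'does the square of the largest
-- prime factor divide n0', and that largest prime factor exists
theorem pvAFinal (n0 j nf : Int) (df : PySem.Dict Int Int)
    (h : pvInv n0 j nf df) (hstop : ¬ (j * j ≤ nf)) (hn0 : 2 ≤ n0) :
    ∃ p, pvIsLargest n0 p ∧
      pvATail nf df = (if PySem.Int.mod n0 (p * p) = 0 then (1:Int) else 0) := by
  obtain ⟨hj2, hnf, hprod, hpair, hkeys, hsmall⟩ := h
  by_cases h1 : nf > 1
  · -- the leftover n is a prime larger than every recorded factor: it is the largest prime
    -- factor, has exponent 1, and both sides give 0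
    have hjnf : j ≤ nf := by
      by_contra hlt
      exact hsmall nf (by omega) (by omega) dvd_rfl
    have hnfp : Prime nf := pvPrime_of_no_divisor_lt nf j (by omega) hj2 (by omega) hsmall
    have hni : df.contains nf = false := by
      by_contra hc
      have hc' : df.contains nf = true := by simpa using hc
      obtain ⟨p, hp, hpe⟩ := List.mem_map.mp ((PySem.Dict.contains_iff_mem_keys df nf).mp hc')
      have := (hkeys p hp).2.1; omega
    have hitems : (df.insert nf 1).items = df.items ++ [(nf, 1)] :=
      PySem.Dict.items_insert_of_not_contains df 1 hni
    have hkeys' : (df.insert nf 1).keys = df.items.map Prod.fst ++ [nf] := by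
      show (df.insert nf 1).items.map (fun x => x.1) = _
      rw [hitems, List.map_append]
      rfl
    have hpair' : ((df.items.map Prod.fst) ++ [nf]).Pairwise (· < ·) := by
      apply List.pairwise_append.mpr
      refine ⟨hpair, by simp, ?_⟩
      intro a ha b hb
      simp only [List.mem_singleton] at hb
      subst hb
      obtain ⟨p, hp, rfl⟩ := List.mem_map.mp ha
      have := (hkeys p hp).2.1; omega
    have hne' : df.items.map Prod.fst ++ [nf] ≠ [] := by simp
    have hmax : PySem.List.max? ((df.insert nf 1).keys) (fun k => k) = some nf := by
      rw [hkeys', pvMax_eq_getLast _ hpair' hne', List.getLast_concat]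
    have hndvd : ¬ (nf * nf ∣ n0) := by
      intro hdvd
      obtain ⟨c, hc⟩ := hdvd
      have hP : (df.items.map fun p => p.1 ^ p.2.toNat).prod = nf * c := by
        have hnfne : nf ≠ 0 := by omega
        apply mul_right_cancel₀ hnfne
        rw [← hprod, hc]; ring
      obtain ⟨x, hx, hdx⟩ := (Prime.dvd_prod_iff hnfp).mp ⟨c, hP⟩
      obtain ⟨p, hp, rfl⟩ := List.mem_map.mp hx
      have hpd : nf ∣ p.1 := hnfp.dvd_of_dvd_pow hdx
      have hle := Int.le_of_dvd (by have := (hkeys p hp).1; omega) hpd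
      have := (hkeys p hp).2.1; omega
    refine ⟨nf, ⟨by omega, hnfp, ⟨(df.items.map fun p => p.1 ^ p.2.toNat).prod, by rw [hprod]; ring⟩, ?_⟩, ?_⟩
    · intro q hq2 hqp hqdvd
      have hq' : q ∣ (df.items.map fun p => p.1 ^ p.2.toNat).prod * nf := hprod ▸ hqdvd
      rcases (Prime.dvd_mul hqp).mp hq' with hh | hh
      · obtain ⟨x, hx, hdx⟩ := (Prime.dvd_prod_iff hqp).mp hh
        obtain ⟨p, hp, rfl⟩ := List.mem_map.mp hx
        have hpd : q ∣ p.1 := hqp.dvd_of_dvd_pow hdx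
        have hle := Int.le_of_dvd (by have := (hkeys p hp).1; omega) hpd
        have := (hkeys p hp).2.1; omega
      · exact Int.le_of_dvd (by omega) hh
    · simp only [pvATail, if_pos h1]
      rw [if_neg (by simp [PySem.Dict.size, hitems])]
      rw [hmax]
      show (if (df.insert nf 1).getD nf 0 > 1 then (1:Int) else 0) = _
      rw [PySem.Dict.getD_insert_self]
      rw [if_neg (by omega : ¬ (1:Int) > 1)]
      rw [if_neg (fun hc => hndvd ((PySem.Int.mod_eq_zero_iff_dvd n0 (nf*nf)).mp hc))]
  · -- nf = 1: the dict's last key is the largest prime factor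
    cases hit : df.items with
    | nil =>
      exfalso
      rw [hit] at hprod
      simp at hprod
      omega
    | cons q qs =>
      have hne : df.items ≠ [] := by rw [hit]; simp
      have hkp := List.getLast_mem hne
      obtain ⟨hk2, hkj, hkprime, hke1⟩ := hkeys _ hkp
      have hsplit : df.items = df.items.dropLast ++ [df.items.getLast hne] :=
        (List.dropLast_append_getLast hne).symm
      have hkeyssplit : df.items.map Prod.fst =
          df.items.dropLast.map Prod.fst ++ [(df.items.getLast hne).1] := by
        conv_lhs => rw [hsplit]
        rw [List.map_append]; rfl
      have hnek : df.items.map Prod.fst ≠ [] := by rw [hit]; simp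
      have hlasteq : (df.items.map Prod.fst).getLast hnek = (df.items.getLast hne).1 := by
        have h2' : (df.items.map Prod.fst).getLast? =
            some ((df.items.map Prod.fst).getLast hnek) := List.getLast?_eq_some_getLast hnek
        have h3' : (df.items.map Prod.fst).getLast? = some ((df.items.getLast hne).1) := by
          rw [hkeyssplit, List.getLast?_concat]
        exact Option.some.inj (h2'.symm.trans h3')
      have hmax : PySem.List.max? (df.keys) (fun k => k) = some (df.items.getLast hne).1 := by
        show PySem.List.max? (df.items.map Prod.fst) (fun k => k) = _
        rw [pvMax_eq_getLast _ hpair hnek, hlasteq]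
      have hnodup : df.keys.Nodup := by
        show (df.items.map (fun x => x.1)).Nodup
        exact hpair.imp ne_of_lt
      have hgd : df.getD (df.items.getLast hne).1 0 = (df.items.getLast hne).2 := by
        apply PySem.Dict.getD_of_mem_items df ?_ hnodup 0
        show ((df.items.getLast hne).1, (df.items.getLast hne).2) ∈ df.items
        rw [Prod.mk.eta]
        exact hkp
      have hnf1 : nf = 1 := by omega
      have hprod1 : n0 = (df.items.map fun p => p.1 ^ p.2.toNat).prod := by
        rw [hprod, hnf1, mul_one]
      have hQ : n0 = (df.items.dropLast.map fun p => p.1 ^ p.2.toNat).prod *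
          (df.items.getLast hne).1 ^ (df.items.getLast hne).2.toNat := by
        rw [hprod1]
        conv_lhs => rw [hsplit]
        rw [List.map_append, List.prod_append]
        simp
      have hiff : (df.items.getLast hne).1 * (df.items.getLast hne).1 ∣ n0 ↔
          (df.items.getLast hne).2 > 1 := by
        constructor
        · intro hdvd
          by_contra hgt
          have hke : (df.items.getLast hne).2 = 1 := by omega
          rw [hQ, hke] at hdvd
          simp only [Int.toNat_one, pow_one] at hdvd
          obtain ⟨c, hc⟩ := hdvd
          have hkne : (df.items.getLast hne).1 ≠ 0 := by omega
          have hP : (df.items.dropLast.map fun p => p.1 ^ p.2.toNat).prod =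
              (df.items.getLast hne).1 * c := by
            apply mul_right_cancel₀ hkne
            rw [hc]; ring
          obtain ⟨x, hx, hdx⟩ := (Prime.dvd_prod_iff hkprime).mp ⟨c, hP⟩
          obtain ⟨p, hp, rfl⟩ := List.mem_map.mp hx
          have hpd : (df.items.getLast hne).1 ∣ p.1 := hkprime.dvd_of_dvd_pow hdx
          have hpmem : p ∈ df.items := (List.dropLast_sublist df.items).subset hp
          have hple := Int.le_of_dvd (by have := (hkeys p hpmem).1; omega) hpd
          have hplt : p.1 < (df.items.getLast hne).1 := by
            have hpa := hkeyssplit ▸ hpair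
            rw [List.pairwise_append] at hpa
            exact hpa.2.2 p.1 (List.mem_map.mpr ⟨p, hp, rfl⟩) _ (by simp)
          omega
        · intro hgt
          have h2le : 2 ≤ (df.items.getLast hne).2.toNat := by omega
          have hd1 : (df.items.getLast hne).1 * (df.items.getLast hne).1 ∣
              (df.items.getLast hne).1 ^ (df.items.getLast hne).2.toNat := by
            have := pow_dvd_pow (df.items.getLast hne).1 h2le
            rwa [pow_two] at this
          exact hd1.trans ⟨(df.items.dropLast.map fun p => p.1 ^ p.2.toNat).prod, by rw [hQ]; ring⟩
      refine ⟨(df.items.getLast hne).1, ⟨hk2, hkprime, ?_, ?_⟩, ?_⟩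
      · have hdl : (df.items.getLast hne).1 ∣
            (df.items.getLast hne).1 ^ (df.items.getLast hne).2.toNat :=
          dvd_pow_self _ (by omega)
        exact hdl.trans ⟨(df.items.dropLast.map fun p => p.1 ^ p.2.toNat).prod, by rw [hQ]; ring⟩
      · intro q hq2 hqp hqdvd
        rw [hprod1] at hqdvd
        obtain ⟨x, hx, hdx⟩ := (Prime.dvd_prod_iff hqp).mp hqdvd
        obtain ⟨p, hp, rfl⟩ := List.mem_map.mp hx
        have hpd : q ∣ p.1 := hqp.dvd_of_dvd_pow hdx
        have hle := Int.le_of_dvd (by have := (hkeys p hp).1; omega) hpd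
        have hple : p.1 ≤ (df.items.map Prod.fst).getLast hnek :=
          pvLe_getLast _ hpair p.1 (List.mem_map.mpr ⟨p, hp, rfl⟩) hnek
        rw [hlasteq] at hple
        omega
      · simp only [pvATail, if_neg h1]
        rw [if_neg (by simp [PySem.Dict.size, hit])]
        rw [hmax]
        show (if df.getD (df.items.getLast hne).1 0 > 1 then (1:Int) else 0) = _
        rw [hgd]
        by_cases hbig : (df.items.getLast hne).2 > 1
        · rw [if_pos hbig,
            if_pos ((PySem.Int.mod_eq_zero_iff_dvd n0 _).mpr (hiff.mpr hbig))]
        · rw [if_neg hbig,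
            if_neg (fun hc => hbig (hiff.mp ((PySem.Int.mod_eq_zero_iff_dvd n0 _).mp hc)))]

-- ===== VERDICT (by name: the statement is the Claim_ definition above) =====
theorem is_largest_prime_factor_power_greater_than_one_spec : Claim_equal_is_largest_prime_factor_power_greater_than_one := by
  intro n _
  unfold Spec_is_largest_prime_factor_power_greater_than_one
  by_cases hn : 2 ≤ n
  · have hInv : pvInv n 2 n PySem.Dict.empty := by
      refine ⟨le_refl 2, by omega, by simp [PySem.Dict.empty], by simp [PySem.Dict.empty],
        by simp [PySem.Dict.empty], ?_⟩
      intro m hm1 hm2 _; omega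
    obtain ⟨j, hstop, hInvf⟩ := pvALoop_spec n 2 n PySem.Dict.empty hInv
    obtain ⟨p, hpl, hA⟩ := pvAFinal n j _ _ hInvf hstop hn
    obtain ⟨hgl, hge1, hgiff⟩ := pvGo_spec n hn
    have hpq : p = (pvGo n).1 := pvIsLargest_unique hpl hgl
    subst hpq
    have hAv : is_largest_prime_factor_power_greater_than_one n =
        pvATail (pvALoop 2 n PySem.Dict.empty).1 (pvALoop 2 n PySem.Dict.empty).2 := rfl
    have hBv : is_largest_prime_factor_power_greater_than_one_alt n =
        (if (pvGo n).2 > 1 then (1:Int) else 0) := by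
      unfold is_largest_prime_factor_power_greater_than_one_alt
      rw [if_neg (by omega)]
    have hsame : (if PySem.Int.mod n ((pvGo n).1 * (pvGo n).1) = 0 then (1:Int) else 0) =
        (if (pvGo n).2 > 1 then (1:Int) else 0) := by
      by_cases hdd : (pvGo n).1 * (pvGo n).1 ∣ n
      · rw [if_pos ((PySem.Int.mod_eq_zero_iff_dvd n _).mpr hdd), if_pos (hgiff.mpr hdd)]
      · rw [if_neg (fun hc => hdd ((PySem.Int.mod_eq_zero_iff_dvd n _).mp hc)),
          if_neg (fun hc => hdd (hgiff.mp hc))]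
    rw [hAv, hA, hsame, hBv]
  · have h4 : ¬ ((2:Int) * 2 ≤ n) := by omega
    unfold is_largest_prime_factor_power_greater_than_one
      is_largest_prime_factor_power_greater_than_one_alt
    rw [pvALoop]
    simp only [h4, if_false]
    have hn1 : ¬ ((n:Int) > 1) := by omega
    simp [pvATail, hn1, (by omega : n ≤ 1), PySem.Dict.empty, PySem.Dict.size]
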